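-- pv_equiv track=rewrite | github.com/Aluerie/AluBot | utils/format.py | block_function
-- ===== SOURCE A (Python) =====
-- def block_function(string, blocked_words, whitelist_words):
--     for blocked_word in blocked_words:
--         if blocked_word.lower() in string.lower():
--             for whitelist_word in whitelist_words:
--                 if whitelist_word.lower() in string.lower():
--                     return 0  # allow
--             return 1  # block
--     return 0  # allow
-- ===== SOURCE B (Python) =====
-- def block_function(string, blocked_words, whitelist_words):
--     # Position-major scan: walk each start index of the lowered string once and
--     # test every pattern for a prefix match there (naive multi-pattern matcher),
--     # keeping two sticky flags; no substring 'in' operator, no early returns.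
--     s = string.lower()
--     found_block = False
--     found_white = False
--     for i in range(len(s) + 1):
--         for w in blocked_words:
--             found_block = found_block or s.startswith(w.lower(), i)
--         for w in whitelist_words:
--             found_white = found_white or s.startswith(w.lower(), i)
--     return 1 if found_block and not found_white else 0
-- ===== Notes on version B (the rewrite author's own statement) =====
-- stated objective: alternative
-- what changed: Replaces A's word-major nested loops with early returns (each word tested by the substring 'in' operator, whitelist scanned inside the blocked loop) by a position-major scan: one pass over every start index of the once-lowered string, testing each pattern for a prefix match at that index and accumulating two sticky boolean flags combined at the end.
import Mathlib
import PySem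

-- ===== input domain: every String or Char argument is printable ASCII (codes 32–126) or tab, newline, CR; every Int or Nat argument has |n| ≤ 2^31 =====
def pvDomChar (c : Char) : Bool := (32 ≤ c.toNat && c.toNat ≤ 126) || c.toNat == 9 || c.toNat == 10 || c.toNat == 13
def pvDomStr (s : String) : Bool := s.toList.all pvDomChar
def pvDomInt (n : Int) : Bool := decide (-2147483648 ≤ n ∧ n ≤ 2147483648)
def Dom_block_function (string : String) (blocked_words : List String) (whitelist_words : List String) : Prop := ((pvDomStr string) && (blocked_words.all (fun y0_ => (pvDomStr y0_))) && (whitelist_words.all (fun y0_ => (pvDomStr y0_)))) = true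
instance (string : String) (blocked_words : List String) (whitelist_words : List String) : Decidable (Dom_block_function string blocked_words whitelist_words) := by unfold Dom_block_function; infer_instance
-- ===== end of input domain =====

-- B replaces A's word-major nested loops with early returns by a position-major scan of the once-lowered string (prefix match of every pattern at each index, two sticky flags); alternative decomposition, not claimed faster.


-- ===== PORT A =====
-- inner loop: for whitelist_word in whitelist_words: if … in string.lower(): return 0; then return 1
def pvInnerA (string : String) : List String → Int
  | [] => 1
  | w :: ws =>
      if PySem.Str.isIn (PySem.Str.lower w) (PySem.Str.lower string) then 0
      else pvInnerA string ws

-- outer loop: for blocked_word in blocked_words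
def pvOuterA (string : String) (whitelist_words : List String) : List String → Int
  | [] => 0
  | b :: bs =>
      if PySem.Str.isIn (PySem.Str.lower b) (PySem.Str.lower string) then
        pvInnerA string whitelist_words
      else pvOuterA string whitelist_words bs

def block_function (string : String) (blocked_words : List String) (whitelist_words : List String) : Int :=
  pvOuterA string whitelist_words blocked_words

-- ===== PORT B =====
-- Python's s.startswith(w, i) for 0 ≤ i: prefix match of w.lower() on s[i:] (exact here since i ≥ 0)
def pvStarts (s : List Char) (i : Int) (w : String) : Bool :=
  PySem.Chars.startswith (s.drop i.toNat) (PySem.Chars.lower w.toList)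

-- the position loop: for i in range(len(s)+1), updating the sticky pair (found_block, found_white)
def pvScanB (s : List Char) (bw ww : List String) : Bool × Bool :=
  (PySem.List.pyRange 0 ((s.length : Int) + 1) 1).foldl
    (fun (acc : Bool × Bool) i =>
      (bw.foldl (fun f w => f || pvStarts s i w) acc.1,
       ww.foldl (fun f w => f || pvStarts s i w) acc.2))
    (false, false)

def block_function_alt (string : String) (blocked_words : List String) (whitelist_words : List String) : Int :=
  let s := PySem.Chars.lower string.toList
  let r := pvScanB s blocked_words whitelist_words
  if r.1 && !r.2 then 1 else 0

-- ===== PRECONDITION & SPEC =====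
def Spec_block_function (string : String) (blocked_words : List String) (whitelist_words : List String) (out : Int) : Prop := out = block_function_alt string blocked_words whitelist_words
instance (string : String) (blocked_words : List String) (whitelist_words : List String) (out : Int) : Decidable (Spec_block_function string blocked_words whitelist_words out) := by unfold Spec_block_function; infer_instance

-- ===== CLAIM (what is proved, stated in full; the proofs are below) =====
def Claim_equal_block_function : Prop := ∀ (string : String) (blocked_words : List String) (whitelist_words : List String), Dom_block_function string blocked_words whitelist_words → Spec_block_function string blocked_words whitelist_words (block_function string blocked_words whitelist_words)

-- ===== LEMMAS AND PROOFS =====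

-- sticky-or fold over a word list is 'any'
lemma foldl_or_any (s : List Char) (i : Int) (ws : List String) (a : Bool) :
    ws.foldl (fun f w => f || pvStarts s i w) a = (a || ws.any (fun w => pvStarts s i w)) := by
  induction ws generalizing a with
  | nil => simp
  | cons w ws ih => simp [List.foldl, ih, Bool.or_assoc]

-- the paired sticky fold over the index list is a pair of 'any's
lemma foldl_pair_any (s : List Char) (bw ww : List String) (idx : List Int) (a b : Bool) :
    idx.foldl
      (fun (acc : Bool × Bool) i =>
        (bw.foldl (fun f w => f || pvStarts s i w) acc.1,
         ww.foldl (fun f w => f || pvStarts s i w) acc.2))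
      (a, b)
    = (a || idx.any (fun i => bw.any (fun w => pvStarts s i w)),
       b || idx.any (fun i => ww.any (fun w => pvStarts s i w))) := by
  induction idx generalizing a b with
  | nil => simp
  | cons i is ih =>
      simp only [List.foldl]
      rw [ih, foldl_or_any, foldl_or_any]
      simp [Bool.or_assoc]

-- scanning every start index for a prefix match is exactly the substring test
lemma any_starts_eq_isIn (s : List Char) (w : String) :
    ((PySem.List.pyRange 0 ((s.length : Int) + 1) 1).any (fun i => pvStarts s i w))
      = PySem.Chars.isIn (PySem.Chars.lower w.toList) s := by
  set sub := PySem.Chars.lower w.toList with hsub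
  rcases h : PySem.Chars.isIn sub s with _ | _
  · -- isIn = false : no index matches
    simp only [List.any_eq_false]
    intro i hi hst
    simp only [pvStarts, ← hsub] at hst
    have : PySem.Chars.isIn sub s = true :=
      (PySem.Chars.exists_prefix_drop_iff_isIn sub s).mp
        ⟨i.toNat, (PySem.Chars.startswith_iff _ _).mp hst⟩
    simp [h] at this
  · -- isIn = true : some index ≤ length matches
    obtain ⟨j, hj⟩ := (PySem.Chars.exists_prefix_drop_iff_isIn sub s).mpr h
    have hj' : sub <+: s.drop (min j s.length) := by
      by_cases hle : j ≤ s.length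
      · simpa [Nat.min_eq_left hle] using hj
      · have hnil : s.drop j = [] := List.drop_eq_nil_of_le (Nat.le_of_lt (Nat.lt_of_not_le hle))
        rw [hnil] at hj
        have hsubnil : sub = [] := List.prefix_nil.mp hj
        simp [hsubnil]
    simp only [List.any_eq_true]
    refine ⟨((min j s.length : Nat) : Int), ?_, ?_⟩
    · rw [PySem.List.mem_pyRange_one]
      constructor
      · positivity
      · have : min j s.length ≤ s.length := Nat.min_le_right _ _
        exact_mod_cast Nat.lt_succ_of_le this
    · simp only [pvStarts, ← hsub, Int.toNat_natCast]
      exact (PySem.Chars.startswith_iff _ _).mpr hj'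

-- A's inner loop is the whitelist 'any'
lemma pvInnerA_eq (string : String) (ww : List String) :
    pvInnerA string ww =
      if ww.any (fun w => PySem.Str.isIn (PySem.Str.lower w) (PySem.Str.lower string)) then 0 else 1 := by
  induction ww with
  | nil => simp [pvInnerA]
  | cons w ws ih =>
      by_cases h : PySem.Chars.isIn (PySem.Chars.lower w.toList) (PySem.Chars.lower string.toList) = true <;>
        simp [pvInnerA, h, ih]

-- ===== VERDICT (by name: the statement is the Claim_ definition above) =====
theorem block_function_spec : Claim_equal_block_function := by
  intro string bw ww hdom
  clear hdom
  unfold Spec_block_function block_function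
  simp only [block_function_alt, pvScanB, foldl_pair_any]
  simp only [Bool.false_or]
  have hB : ∀ (l : List String),
      ((PySem.List.pyRange 0 (((PySem.Chars.lower string.toList).length : Int) + 1) 1).any
        (fun i => l.any (fun w => pvStarts (PySem.Chars.lower string.toList) i w)))
      = l.any (fun w => PySem.Str.isIn (PySem.Str.lower w) (PySem.Str.lower string)) := by
    intro l
    rw [Bool.eq_iff_iff]
    simp only [List.any_eq_true]
    constructor
    · rintro ⟨i, hi, w, hw, hpw⟩
      refine ⟨w, hw, ?_⟩
      have : ((PySem.List.pyRange 0 (((PySem.Chars.lower string.toList).length : Int) + 1) 1).any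
          (fun i => pvStarts (PySem.Chars.lower string.toList) i w)) = true :=
        List.any_eq_true.mpr ⟨i, hi, hpw⟩
      rw [any_starts_eq_isIn] at this
      simpa [PySem.Str.isIn, PySem.Str.lower] using this
    · rintro ⟨w, hw, hin⟩
      have hin' : PySem.Chars.isIn (PySem.Chars.lower w.toList) (PySem.Chars.lower string.toList) = true := by
        simpa [PySem.Str.isIn, PySem.Str.lower] using hin
      rw [← any_starts_eq_isIn] at hin'
      obtain ⟨i, hi, hpw⟩ := List.any_eq_true.mp hin'
      exact ⟨i, hi, w, hw, hpw⟩
  rw [hB bw, hB ww]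
  induction bw with
  | nil => simp [pvOuterA]
  | cons b bs ih =>
      by_cases h : PySem.Chars.isIn (PySem.Chars.lower b.toList) (PySem.Chars.lower string.toList) = true
      · simp only [pvOuterA]
        rw [if_pos (by simpa using h), pvInnerA_eq]
        by_cases hw : ∃ x ∈ ww, PySem.Chars.isIn (PySem.Chars.lower x.toList) (PySem.Chars.lower string.toList) = true
        · simp [h, hw]
        · simp [h, hw]
      · simp only [pvOuterA]
        rw [if_neg (by simpa using h)]
        simpa [h] using ih
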